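-- pv_equiv track=rewrite | github.com/UserName19616/Skillfactory | Test_game.py | w_comb
-- ===== SOURCE A (Python) =====
-- def w_comb(board, player_size):
-- # Переберем строки
-- # Создадим матрицу
--     m_rez = []
--     c_m_rez = []
--     c_m_rez2 = []
--     c_list = []
--     t1 = 0
--     t2 = 0
--     test = ""
--     c_r = ""
--     wc = tuple
-- # Переберем строки
--     for i in range(player_size):
--         c_list.append(int(i))
--         for i1 in range(player_size):
--             c_r = int(i1 + i * player_size)
--             c_m_rez.append(c_r)
--             if i1 == player_size-1:
--                 m_rez.append(c_m_rez)
--                 c_m_rez = []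
-- # Переберем столбцы
--     c_m_rez = m_rez
--     for i in range(len(c_m_rez)):
--         for j in range(len(c_m_rez[i])):
--             c_m_rez2.append(int(c_m_rez[j][i]))
--         m_rez.append(c_m_rez2)
--         c_m_rez2 = []
-- # Переберем диагонали
-- # Самая простая
--     c_m_rez = m_rez
--     for i in range(len(c_m_rez)):
--        for j in range(len(c_m_rez[i])):
--             if i == j:
--                 c_m_rez2.append(int(c_m_rez[i][j]))
--     m_rez.append(c_m_rez2)
--     c_m_rez2 = []
-- # Обратная диагональ
--     t2 = len(c_list)-1
--     for i in range(len(c_list)):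
--         for j in reversed(c_list):
--             if t1 == i and t2 == j:
--                 c_m_rez2.append(int(c_m_rez[j][i]))
--                 t1 = t1 + 1
--                 t2 = t2 - 1
--     m_rez.append(c_m_rez2)
--     c_m_rez2 = []
--     wc = m_rez
--     return wc
-- ===== SOURCE B (Python) =====
-- def w_comb(board, player_size):
--     # Direct index arithmetic: rows, columns, main and anti diagonal.
--     n = player_size
--     rows = [[i * n + j for j in range(n)] for i in range(n)]
--     cols = [[j * n + i for j in range(n)] for i in range(n)]
--     diag = [i * n + i for i in range(n)]
--     anti = [(n - 1 - i) * n + i for i in range(n)]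
--     return rows + cols + [diag, anti]
-- ===== Notes on version B (the rewrite author's own statement) =====
-- stated objective: simpler
-- what changed: Replaces the n-squared scan-with-guard for the diagonal and the stateful t1/t2 match for the anti-diagonal (and the aliased-list column pass) with direct closed-form index arithmetic per cell.
import Mathlib
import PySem

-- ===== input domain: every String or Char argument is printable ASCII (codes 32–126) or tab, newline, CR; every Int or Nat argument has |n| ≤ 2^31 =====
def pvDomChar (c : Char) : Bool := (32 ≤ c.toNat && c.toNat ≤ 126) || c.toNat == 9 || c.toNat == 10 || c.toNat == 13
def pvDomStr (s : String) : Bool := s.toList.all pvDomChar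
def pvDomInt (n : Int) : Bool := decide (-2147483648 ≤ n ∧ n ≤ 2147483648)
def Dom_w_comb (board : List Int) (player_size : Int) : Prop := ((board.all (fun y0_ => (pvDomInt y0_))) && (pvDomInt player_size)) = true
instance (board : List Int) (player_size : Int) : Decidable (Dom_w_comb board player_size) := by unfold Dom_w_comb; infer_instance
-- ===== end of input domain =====

-- B replaces A's scan-with-guard diagonal passes, aliased column pass and stateful
-- t1/t2 anti-diagonal counters with direct closed-form index arithmetic (objective: simpler).

-- ===== PORT A =====
-- step-for-step transcription of A; the Python state tuples are written out explicitly
-- (m_rez, c_m_rez, c_list / c_m_rez2, t1, t2); 'c_m_rez = m_rez' aliasing is modelled by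
-- folding over the same growing accumulator the loop indexes into.
def w_comb (board : List Int) (player_size : Int) : List (List Int) :=
  let n := player_size
  -- rows (state: m_rez, c_m_rez, c_list)
  let s1 : List (List Int) × List Int × List Int :=
    (PySem.List.pyRange 0 n 1).foldl (fun st i =>
      (((PySem.List.pyRange 0 n 1).foldl (fun (p : List (List Int) × List Int) i1 =>
          if i1 == n - 1 then (p.1 ++ [p.2 ++ [i1 + i * n]], ([] : List Int))
          else (p.1, p.2 ++ [i1 + i * n])) (st.1, st.2.1)).1,
       ((PySem.List.pyRange 0 n 1).foldl (fun (p : List (List Int) × List Int) i1 =>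
          if i1 == n - 1 then (p.1 ++ [p.2 ++ [i1 + i * n]], ([] : List Int))
          else (p.1, p.2 ++ [i1 + i * n])) (st.1, st.2.1)).2,
       st.2.2 ++ [i]))
      ([], [], [])
  let m1 := s1.1
  let cList := s1.2.2
  -- columns (c_m_rez aliases m_rez, which grows while being indexed)
  let m2 := (PySem.List.pyRange 0 (m1.length : Int) 1).foldl (fun m i =>
      m ++ [(PySem.List.pyRange 0 ((PySem.List.pyGetD m i []).length : Int) 1).foldl
          (fun acc j => acc ++ [PySem.List.pyGetD (PySem.List.pyGetD m j []) i 0]) []]) m1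
  -- main diagonal by full scan with the i == j guard
  let d := (PySem.List.pyRange 0 (m2.length : Int) 1).foldl (fun acc i =>
      (PySem.List.pyRange 0 ((PySem.List.pyGetD m2 i []).length : Int) 1).foldl
        (fun acc j => if i == j then acc ++ [PySem.List.pyGetD (PySem.List.pyGetD m2 i []) j 0] else acc) acc) []
  let m3 := m2 ++ [d]
  -- anti-diagonal via the t1/t2 counters (state: c_m_rez2, t1, t2)
  let s4 : List Int × Int × Int :=
    (PySem.List.pyRange 0 (cList.length : Int) 1).foldl (fun st i =>
      cList.reverse.foldl (fun (st : List Int × Int × Int) j =>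
        if st.2.1 == i && st.2.2 == j then
          (st.1 ++ [PySem.List.pyGetD (PySem.List.pyGetD m3 j []) i 0], st.2.1 + 1, st.2.2 - 1)
        else st) st)
      ([], 0, (cList.length : Int) - 1)
  m3 ++ [s4.1]

-- ===== PORT B =====
def w_comb_alt (board : List Int) (player_size : Int) : List (List Int) :=
  let n := player_size
  let r := PySem.List.pyRange 0 n 1
  (r.map (fun i => r.map (fun j => i * n + j)))
    ++ (r.map (fun i => r.map (fun j => j * n + i)))
    ++ [r.map (fun i => i * n + i), r.map (fun i => (n - 1 - i) * n + i)]

-- ===== PRECONDITION & SPEC =====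
def Spec_w_comb (board : List Int) (player_size : Int) (out : List (List Int)) : Prop := out = w_comb_alt board player_size
instance (board : List Int) (player_size : Int) (out : List (List Int)) : Decidable (Spec_w_comb board player_size out) := by unfold Spec_w_comb; infer_instance

-- ===== CLAIM (what is proved, stated in full; the proofs are below) =====
def Claim_equal_w_comb : Prop := ∀ (board : List Int) (player_size : Int), Dom_w_comb board player_size → Spec_w_comb board player_size (w_comb board player_size)

-- ===== LEMMAS AND PROOFS =====

-- abbreviations for A's intermediate lists (proof helpers only)
def pvRow (n i : Int) : List Int := (PySem.List.pyRange 0 n 1).map (fun i1 => i1 + i * n)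
def pvRows (n : Int) : List (List Int) := (PySem.List.pyRange 0 n 1).map (pvRow n)
def pvCol (n i : Int) : List Int := (PySem.List.pyRange 0 n 1).map (fun j => i + j * n)
def pvM2 (n : Int) : List (List Int) := pvRows n ++ (PySem.List.pyRange 0 n 1).map (pvCol n)

theorem pvRow_length (n i : Int) : (pvRow n i).length = n.toNat := by
  simp [pvRow, PySem.List.length_pyRange_one]

theorem pvCol_length (n i : Int) : (pvCol n i).length = n.toNat := by
  simp [pvCol, PySem.List.length_pyRange_one]

theorem pvRows_length (n : Int) : (pvRows n).length = n.toNat := by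
  simp [pvRows, PySem.List.length_pyRange_one]

-- indexing into the growing m_rez: a left (row) index
theorem pvGet_rows (n i : Int) (h0 : 0 ≤ i) (h : i < n) (rest : List (List Int)) :
    PySem.List.pyGetD (pvRows n ++ rest) i [] = pvRow n i := by
  have hi : i.toNat < (pvRows n).length := by
    rw [pvRows_length]; omega
  have hlen : i < ((pvRows n ++ rest).length : Int) := by
    rw [List.length_append]; push_cast; rw [pvRows_length]; omega
  rw [PySem.List.pyGetD_eq_getElem _ _ h0 hlen]
  rw [List.getElem_append_left hi]
  simp only [pvRows, List.getElem_map, PySem.List.getElem_pyRange_one]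
  congr 1
  omega

-- a column index (between n and 2n)
theorem pvGet_cols (n i : Int) (hn : n ≤ i) (h : i < 2 * n) (rest : List (List Int)) :
    PySem.List.pyGetD (pvM2 n ++ rest) i [] = pvCol n (i - n) := by
  have h0 : 0 ≤ i := by omega
  have hi : i.toNat < (pvM2 n).length := by
    simp [pvM2, pvRows_length, PySem.List.length_pyRange_one]; omega
  have hlen : i < ((pvM2 n ++ rest).length : Int) := by
    rw [List.length_append]; push_cast
    simp [pvM2, pvRows_length, PySem.List.length_pyRange_one]; omega
  rw [PySem.List.pyGetD_eq_getElem _ _ h0 hlen]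
  rw [List.getElem_append_left hi]
  have hrl : (pvRows n).length ≤ i.toNat := by rw [pvRows_length]; omega
  simp only [pvM2]
  rw [List.getElem_append_right hrl]
  simp only [List.getElem_map, PySem.List.getElem_pyRange_one]
  congr 1
  rw [pvRows_length]
  omega

-- element of a row
theorem pvGet_row (n i j : Int) (h0 : 0 ≤ i) (h : i < n) :
    PySem.List.pyGetD (pvRow n j) i 0 = i + j * n := by
  rw [pvRow, PySem.List.pyGetD_map_pyRange_of_nonneg _ _ _ _ h0 h]

-- phase 1 inner loop: one full row gets appended
theorem pvPhase1_inner (n i : Int) (a : Int) (h0 : 0 ≤ a) (ha : a ≤ n - 1)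
    (m : List (List Int)) (c : List Int) :
    (PySem.List.pyRange a n 1).foldl (fun (p : List (List Int) × List Int) i1 =>
        if i1 == n - 1 then (p.1 ++ [p.2 ++ [i1 + i * n]], ([] : List Int))
        else (p.1, p.2 ++ [i1 + i * n])) (m, c)
      = (m ++ [c ++ (PySem.List.pyRange a n 1).map (fun i1 => i1 + i * n)], []) := by
  have key : ∀ k : Nat, ∀ a : Int, 0 ≤ a → a ≤ n - 1 → (n - 1 - a).toNat = k →
      ∀ (m : List (List Int)) (c : List Int),
      (PySem.List.pyRange a n 1).foldl (fun (p : List (List Int) × List Int) i1 =>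
          if i1 == n - 1 then (p.1 ++ [p.2 ++ [i1 + i * n]], ([] : List Int))
          else (p.1, p.2 ++ [i1 + i * n])) (m, c)
        = (m ++ [c ++ (PySem.List.pyRange a n 1).map (fun i1 => i1 + i * n)], []) := by
    intro k
    induction k with
    | zero =>
      intro a h0 ha hk m c
      have he : a = n - 1 := by omega
      rw [PySem.List.pyRange_one_cons (by omega : a < n),
          PySem.List.pyRange_one_eq_nil (by omega : n ≤ a + 1)]
      subst he
      simp
    | succ k ih =>
      intro a h0 ha hk m c
      rw [PySem.List.pyRange_one_cons (by omega : a < n)]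
      simp only [List.foldl_cons, List.map_cons]
      rw [if_neg (by simp; omega)]
      rw [ih (a + 1) (by omega) (by omega) (by omega) m (c ++ [a + i * n])]
      simp
  exact key _ a h0 ha rfl m c

-- phase 1 outer loop
theorem pvPhase1 (n : Int) (hn : 0 < n) (a : Int) (h0 : 0 ≤ a) (ha : a ≤ n)
    (m : List (List Int)) (cl : List Int) :
    (PySem.List.pyRange a n 1).foldl (fun (st : List (List Int) × List Int × List Int) i =>
      (((PySem.List.pyRange 0 n 1).foldl (fun (p : List (List Int) × List Int) i1 =>
          if i1 == n - 1 then (p.1 ++ [p.2 ++ [i1 + i * n]], ([] : List Int))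
          else (p.1, p.2 ++ [i1 + i * n])) (st.1, st.2.1)).1,
       ((PySem.List.pyRange 0 n 1).foldl (fun (p : List (List Int) × List Int) i1 =>
          if i1 == n - 1 then (p.1 ++ [p.2 ++ [i1 + i * n]], ([] : List Int))
          else (p.1, p.2 ++ [i1 + i * n])) (st.1, st.2.1)).2,
       st.2.2 ++ [i])) (m, [], cl)
      = (m ++ (PySem.List.pyRange a n 1).map (pvRow n), [], cl ++ PySem.List.pyRange a n 1) := by
  have key : ∀ k : Nat, ∀ a : Int, 0 ≤ a → a ≤ n → (n - a).toNat = k →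
      ∀ (m : List (List Int)) (cl : List Int),
      (PySem.List.pyRange a n 1).foldl (fun (st : List (List Int) × List Int × List Int) i =>
        (((PySem.List.pyRange 0 n 1).foldl (fun (p : List (List Int) × List Int) i1 =>
            if i1 == n - 1 then (p.1 ++ [p.2 ++ [i1 + i * n]], ([] : List Int))
            else (p.1, p.2 ++ [i1 + i * n])) (st.1, st.2.1)).1,
         ((PySem.List.pyRange 0 n 1).foldl (fun (p : List (List Int) × List Int) i1 =>
            if i1 == n - 1 then (p.1 ++ [p.2 ++ [i1 + i * n]], ([] : List Int))
            else (p.1, p.2 ++ [i1 + i * n])) (st.1, st.2.1)).2,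
         st.2.2 ++ [i])) (m, [], cl)
        = (m ++ (PySem.List.pyRange a n 1).map (pvRow n), [], cl ++ PySem.List.pyRange a n 1) := by
    intro k
    induction k with
    | zero =>
      intro a h0 ha hk m cl
      rw [PySem.List.pyRange_one_eq_nil (by omega : n ≤ a)]
      simp
    | succ k ih =>
      intro a h0 ha hk m cl
      rw [PySem.List.pyRange_one_cons (by omega : a < n)]
      simp only [List.foldl_cons, List.map_cons]
      rw [pvPhase1_inner n a 0 le_rfl (by omega) m []]
      simp only [List.nil_append]
      rw [ih (a + 1) (by omega) (by omega) (by omega)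
          (m ++ [(PySem.List.pyRange 0 n 1).map (fun i1 => i1 + a * n)]) (cl ++ [a])]
      simp [pvRow]
  exact key _ a h0 ha rfl m cl

-- phase 2: columns get appended one by one
theorem pvPhase2 (n : Int) (hn : 0 < n) (a : Int) (h0 : 0 ≤ a) (ha : a ≤ n)
    (acc : List (List Int)) :
    (PySem.List.pyRange a n 1).foldl (fun m i =>
      m ++ [(PySem.List.pyRange 0 ((PySem.List.pyGetD m i []).length : Int) 1).foldl
          (fun acc j => acc ++ [PySem.List.pyGetD (PySem.List.pyGetD m j []) i 0]) []]) (pvRows n ++ acc)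
      = pvRows n ++ acc ++ (PySem.List.pyRange a n 1).map (pvCol n) := by
  have key : ∀ k : Nat, ∀ a : Int, 0 ≤ a → a ≤ n → (n - a).toNat = k →
      ∀ (acc : List (List Int)),
      (PySem.List.pyRange a n 1).foldl (fun m i =>
        m ++ [(PySem.List.pyRange 0 ((PySem.List.pyGetD m i []).length : Int) 1).foldl
            (fun acc j => acc ++ [PySem.List.pyGetD (PySem.List.pyGetD m j []) i 0]) []]) (pvRows n ++ acc)
        = pvRows n ++ acc ++ (PySem.List.pyRange a n 1).map (pvCol n) := by
    intro k
    induction k with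
    | zero =>
      intro a h0 ha hk acc
      rw [PySem.List.pyRange_one_eq_nil (by omega : n ≤ a)]
      simp
    | succ k ih =>
      intro a h0 ha hk acc
      rw [PySem.List.pyRange_one_cons (by omega : a < n)]
      simp only [List.foldl_cons, List.map_cons]
      rw [pvGet_rows n a h0 (by omega) acc]
      rw [show ((pvRow n a).length : Int) = n by rw [pvRow_length]; omega]
      have hinner : (PySem.List.pyRange 0 n 1).foldl
          (fun acc2 j => acc2 ++ [PySem.List.pyGetD (PySem.List.pyGetD (pvRows n ++ acc) j []) a 0]) []
          = pvCol n a := by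
        rw [PySem.List.foldl_append_singleton_eq_map]
        rw [List.nil_append, pvCol]
        apply List.map_congr_left
        intro j hj
        rw [PySem.List.mem_pyRange_one] at hj
        rw [pvGet_rows n j hj.1 hj.2 acc, pvGet_row n a j h0 (by omega)]
      rw [hinner]
      rw [List.append_assoc (pvRows n) acc [pvCol n a]]
      rw [ih (a + 1) (by omega) (by omega) (by omega) (acc ++ [pvCol n a])]
      simp
  exact key _ a h0 ha rfl acc

-- filter of a range by an equality test
theorem pvFilter_range (i a b : Int) :
    (PySem.List.pyRange a b 1).filter (fun j => i == j)
      = if a ≤ i ∧ i < b then [i] else [] := by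
  have key : ∀ k : Nat, ∀ a : Int, (b - a).toNat = k →
      (PySem.List.pyRange a b 1).filter (fun j => i == j)
        = if a ≤ i ∧ i < b then [i] else [] := by
    intro k
    induction k with
    | zero =>
      intro a hk
      rw [PySem.List.pyRange_one_eq_nil (by omega : b ≤ a)]
      rw [if_neg (by omega)]
      rfl
    | succ k ih =>
      intro a hk
      rw [PySem.List.pyRange_one_cons (by omega : a < b)]
      rw [List.filter_cons]
      by_cases hia : i = a
      · subst hia
        simp only [BEq.rfl, if_pos]
        rw [if_pos ⟨le_rfl, by omega⟩]
        rw [ih (i + 1) (by omega)]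
        rw [if_neg (by omega)]
      · have hne : (i == a) = false := by simp [hia]
        simp only [hne, Bool.false_eq_true, if_false]
        rw [ih (a + 1) (by omega)]
        by_cases hin : a ≤ i ∧ i < b
        · rw [if_pos hin, if_pos (by omega)]
        · rw [if_neg hin, if_neg (by omega)]
  exact key _ a rfl

theorem pvM2_length_int (n : Int) (hn : 0 < n) : (((pvM2 n).length : Nat) : Int) = 2 * n := by
  simp [pvM2, pvRows_length, PySem.List.length_pyRange_one]
  omega

-- phase 3 inner loop: the i == j guard keeps exactly the diagonal cell (for i < n)
theorem pvPhase3_inner (n : Int) (hn : 0 < n) (i : Int) (h0 : 0 ≤ i) (h2 : i < 2 * n)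
    (acc : List Int) :
    (PySem.List.pyRange 0 ((PySem.List.pyGetD (pvM2 n) i []).length : Int) 1).foldl
        (fun acc j => if i == j then acc ++ [PySem.List.pyGetD (PySem.List.pyGetD (pvM2 n) i []) j 0] else acc) acc
      = acc ++ (if i < n then [i + i * n] else []) := by
  by_cases hi : i < n
  · have hg : PySem.List.pyGetD (pvM2 n) i [] = pvRow n i := by
      have := pvGet_rows n i h0 hi ((PySem.List.pyRange 0 n 1).map (pvCol n))
      rw [pvM2]; exact this
    rw [hg, show ((pvRow n i).length : Int) = n by rw [pvRow_length]; omega]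
    rw [PySem.List.foldl_append_if (fun j => i == j) (fun j => PySem.List.pyGetD (pvRow n i) j 0)]
    rw [pvFilter_range i 0 n, if_pos ⟨h0, hi⟩]
    rw [if_pos hi]
    simp only [List.map_cons, List.map_nil]
    rw [pvGet_row n i i h0 hi]
  · have hg : PySem.List.pyGetD (pvM2 n) i [] = pvCol n (i - n) := by
      have := pvGet_cols n i (by omega) h2 []
      rwa [List.append_nil] at this
    rw [hg, show ((pvCol n (i - n)).length : Int) = n by rw [pvCol_length]; omega]
    rw [PySem.List.foldl_append_if (fun j => i == j) (fun j => PySem.List.pyGetD (pvCol n (i - n)) j 0)]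
    rw [pvFilter_range i 0 n, if_neg (by omega)]
    rw [if_neg hi]
    simp

-- phase 3 outer loop
theorem pvPhase3 (n : Int) (hn : 0 < n) (acc : List Int) :
    (PySem.List.pyRange 0 (2 * n) 1).foldl (fun acc i =>
      (PySem.List.pyRange 0 ((PySem.List.pyGetD (pvM2 n) i []).length : Int) 1).foldl
        (fun acc j => if i == j then acc ++ [PySem.List.pyGetD (PySem.List.pyGetD (pvM2 n) i []) j 0] else acc) acc) acc
      = acc ++ (PySem.List.pyRange 0 (2 * n) 1).flatMap (fun i => if i < n then [i + i * n] else []) := by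
  have key : ∀ k : Nat, ∀ a : Int, 0 ≤ a → a ≤ 2 * n → (2 * n - a).toNat = k → ∀ acc : List Int,
      (PySem.List.pyRange a (2 * n) 1).foldl (fun acc i =>
        (PySem.List.pyRange 0 ((PySem.List.pyGetD (pvM2 n) i []).length : Int) 1).foldl
          (fun acc j => if i == j then acc ++ [PySem.List.pyGetD (PySem.List.pyGetD (pvM2 n) i []) j 0] else acc) acc) acc
        = acc ++ (PySem.List.pyRange a (2 * n) 1).flatMap (fun i => if i < n then [i + i * n] else []) := by
    intro k
    induction k with
    | zero =>
      intro a h0 ha hk acc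
      rw [PySem.List.pyRange_one_eq_nil (by omega : 2 * n ≤ a)]
      simp
    | succ k ih =>
      intro a h0 ha hk acc
      rw [PySem.List.pyRange_one_cons (by omega : a < 2 * n)]
      simp only [List.foldl_cons, List.flatMap_cons]
      rw [pvPhase3_inner n hn a h0 (by omega) acc]
      rw [ih (a + 1) (by omega) (by omega) (by omega)]
      rw [List.append_assoc]
  exact key _ 0 le_rfl (by omega) rfl acc

theorem pvFlat_lt (n : Int) (l : List Int) (h : ∀ x ∈ l, x < n) :
    l.flatMap (fun i => if i < n then [i + i * n] else []) = l.map (fun i => i + i * n) := by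
  induction l with
  | nil => rfl
  | cons a l ih =>
    rw [List.flatMap_cons, List.map_cons, if_pos (h a List.mem_cons_self)]
    rw [ih (fun x hx => h x (List.mem_cons_of_mem a hx))]
    rfl

theorem pvFlat_ge (n : Int) (l : List Int) (h : ∀ x ∈ l, n ≤ x) :
    l.flatMap (fun i => if i < n then [i + i * n] else []) = [] := by
  induction l with
  | nil => rfl
  | cons a l ih =>
    rw [List.flatMap_cons, if_neg (by have := h a List.mem_cons_self; omega)]
    rw [ih (fun x hx => h x (List.mem_cons_of_mem a hx))]
    rfl

theorem pvDiag (n : Int) (hn : 0 < n) :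
    (PySem.List.pyRange 0 (2 * n) 1).flatMap (fun i => if i < n then [i + i * n] else [])
      = (PySem.List.pyRange 0 n 1).map (fun i => i + i * n) := by
  rw [PySem.List.pyRange_one_append 0 n (2 * n) (by omega) (by omega)]
  rw [List.flatMap_append]
  rw [pvFlat_lt n _ (fun x hx => (PySem.List.mem_pyRange_one.mp hx).2)]
  rw [pvFlat_ge n _ (fun x hx => (PySem.List.mem_pyRange_one.mp hx).1)]
  rw [List.append_nil]

-- phase 4: the counters never fire once t1 has moved past i
theorem pvPhase4_skip (v : Int → Int) (i : Int) (l : List Int) :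
    ∀ (st : List Int × Int × Int), st.2.1 ≠ i →
    l.foldl (fun (st : List Int × Int × Int) j =>
      if st.2.1 == i && st.2.2 == j then (st.1 ++ [v j], st.2.1 + 1, st.2.2 - 1) else st) st = st := by
  induction l with
  | nil => intro st h; rfl
  | cons a l ih =>
    intro st h
    rw [List.foldl_cons, if_neg (by simp [h])]
    exact ih st h

-- phase 4: with t1 = i the unique j = t2 fires exactly once
theorem pvPhase4_hit (v : Int → Int) (i : Int) (l : List Int) :
    ∀ (t2 : Int) (c2 : List Int), t2 ∈ l →
    l.foldl (fun (st : List Int × Int × Int) j =>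
      if st.2.1 == i && st.2.2 == j then (st.1 ++ [v j], st.2.1 + 1, st.2.2 - 1) else st) (c2, i, t2)
      = (c2 ++ [v t2], i + 1, t2 - 1) := by
  induction l with
  | nil => intro t2 c2 h; cases h
  | cons a l ih =>
    intro t2 c2 h
    rw [List.foldl_cons]
    by_cases hat : a = t2
    · subst hat
      rw [if_pos (by simp)]
      exact pvPhase4_skip v i l _ (by simp)
    · have hne : t2 ≠ a := fun hh => hat hh.symm
      rw [if_neg (by simp [hne])]
      exact ih t2 c2 ((List.mem_cons.mp h).resolve_left hne)

-- phase 4 outer loop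
theorem pvPhase4 (n : Int) (hn : 0 < n) (w : Int → Int → Int) (c2 : List Int) :
    (PySem.List.pyRange 0 n 1).foldl (fun (st : List Int × Int × Int) i =>
      (PySem.List.pyRange 0 n 1).reverse.foldl (fun (st : List Int × Int × Int) j =>
        if st.2.1 == i && st.2.2 == j then (st.1 ++ [w i j], st.2.1 + 1, st.2.2 - 1) else st) st)
      (c2, 0, n - 1)
      = (c2 ++ (PySem.List.pyRange 0 n 1).map (fun i => w i (n - 1 - i)), n, -1) := by
  have key : ∀ k : Nat, ∀ a : Int, 0 ≤ a → a ≤ n → (n - a).toNat = k → ∀ c2 : List Int,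
      (PySem.List.pyRange a n 1).foldl (fun (st : List Int × Int × Int) i =>
        (PySem.List.pyRange 0 n 1).reverse.foldl (fun (st : List Int × Int × Int) j =>
          if st.2.1 == i && st.2.2 == j then (st.1 ++ [w i j], st.2.1 + 1, st.2.2 - 1) else st) st)
        (c2, a, n - 1 - a)
        = (c2 ++ (PySem.List.pyRange a n 1).map (fun i => w i (n - 1 - i)), n, -1) := by
    intro k
    induction k with
    | zero =>
      intro a h0 ha hk c2
      rw [PySem.List.pyRange_one_eq_nil (by omega : n ≤ a)]
      simp only [List.foldl_nil, List.map_nil, List.append_nil]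
      have h1 : a = n := by omega
      have h2 : n - 1 - a = -1 := by omega
      rw [h2, h1]
    | succ k ih =>
      intro a h0 ha hk c2
      rw [PySem.List.pyRange_one_cons (by omega : a < n)]
      simp only [List.foldl_cons, List.map_cons]
      rw [pvPhase4_hit (w a) a ((PySem.List.pyRange 0 n 1).reverse) (n - 1 - a) c2
          (by rw [List.mem_reverse, PySem.List.mem_pyRange_one]; omega)]
      rw [show n - 1 - a - 1 = n - 1 - (a + 1) by ring]
      rw [ih (a + 1) (by omega) (by omega) (by omega)]
      simp
  have := key (n - 0).toNat 0 le_rfl (by omega) rfl c2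
  rw [show n - 1 - 0 = n - 1 by ring] at this
  exact this

-- main equality for positive n
theorem pvMain_pos (board : List Int) (n : Int) (hn : 0 < n) :
    w_comb board n = w_comb_alt board n := by
  unfold w_comb w_comb_alt
  dsimp only
  rw [pvPhase1 n hn 0 le_rfl hn.le [] []]
  dsimp only
  simp only [List.nil_append]
  rw [show (PySem.List.pyRange 0 n 1).map (pvRow n) = pvRows n from rfl]
  rw [show ((pvRows n).length : Int) = n by rw [pvRows_length]; omega]
  rw [show pvRows n = pvRows n ++ ([] : List (List Int)) from (List.append_nil _).symm]
  rw [pvPhase2 n hn 0 le_rfl hn.le []]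
  simp only [List.append_nil]
  rw [show pvRows n ++ (PySem.List.pyRange 0 n 1).map (pvCol n) = pvM2 n from rfl]
  rw [pvM2_length_int n hn]
  rw [pvPhase3 n hn []]
  simp only [List.nil_append]
  rw [pvDiag n hn]
  rw [show (((PySem.List.pyRange 0 n 1).length : Nat) : Int) = n by
        rw [PySem.List.length_pyRange_one]; omega]
  rw [pvPhase4 n hn
      (fun i j => PySem.List.pyGetD (PySem.List.pyGetD
        (pvM2 n ++ [(PySem.List.pyRange 0 n 1).map (fun i => i + i * n)]) j []) i 0) []]
  dsimp only
  simp only [List.nil_append]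
  -- evaluate the anti-diagonal entries
  have hanti : (PySem.List.pyRange 0 n 1).map (fun i => PySem.List.pyGetD (PySem.List.pyGetD
        (pvM2 n ++ [(PySem.List.pyRange 0 n 1).map (fun i => i + i * n)]) (n - 1 - i) []) i 0)
      = (PySem.List.pyRange 0 n 1).map (fun i => i + (n - 1 - i) * n) := by
    apply List.map_congr_left
    intro i hi
    rw [PySem.List.mem_pyRange_one] at hi
    rw [show pvM2 n ++ [(PySem.List.pyRange 0 n 1).map (fun i => i + i * n)]
          = pvRows n ++ ((PySem.List.pyRange 0 n 1).map (pvCol n)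
              ++ [(PySem.List.pyRange 0 n 1).map (fun i => i + i * n)]) by
        rw [pvM2, List.append_assoc]]
    rw [pvGet_rows n (n - 1 - i) (by omega) (by omega)]
    rw [pvGet_row n i (n - 1 - i) hi.1 hi.2]
  rw [hanti]
  -- both sides are rows ++ cols ++ [diag, anti]; compare entrywise with ring
  simp only [pvM2, pvRows, pvRow, List.append_assoc, List.cons_append, List.nil_append]
  congr 1
  · apply List.map_congr_left
    intro i _
    apply List.map_congr_left
    intro j _
    ring
  congr 1
  · apply List.map_congr_left
    intro i _
    apply List.map_congr_left
    intro j _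
    ring
  congr 1
  · apply List.map_congr_left
    intro i _
    ring
  congr 1
  apply List.map_congr_left
  intro i _
  ring

-- degenerate sizes: both return [[], []]
theorem pvMain_nonpos (board : List Int) (n : Int) (hn : n ≤ 0) :
    w_comb board n = w_comb_alt board n := by
  unfold w_comb w_comb_alt
  simp [PySem.List.pyRange_one_eq_nil hn]

-- ===== VERDICT (by name: the statement is the Claim_ definition above) =====
theorem w_comb_spec : Claim_equal_w_comb := by
  intro board n _
  unfold Spec_w_comb
  by_cases hn : 0 < n
  · exact pvMain_pos board n hn
  · exact pvMain_nonpos board n (by omega)
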